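-- pv_equiv track=rewrite | github.com/Enricovc2001/EP1-Desoft | Blackjack.py | to_string_cartas
-- ===== SOURCE A (Python) =====
-- def conta_pontos(cartas):
--
--     total = 0
--
--     for carta in cartas:
--         if carta >=2 and carta <= 10:
--             total += carta
--         elif carta > 10:
--             total += 10
--
--     for carta in cartas:
--         if carta == 1:
--             if (total + 11) > 21:
--                 total += 1
--             else:
--                 total += 11
--
--
--     return total
--
-- def to_string_cartas(cartas):
--     s = "[ "
--     for carta in cartas:
--         if carta == 1:
--            s += "A "
--         elif carta == 11:
--            s += "J "
--         elif carta == 12: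
--            s += "Q "
--         elif carta == 13:
--            s += "K "
--         else:
--            s += str(carta) + " "
--     return s + "] = " + str(conta_pontos(cartas))
-- ===== SOURCE B (Python) =====
-- def to_string_cartas(cartas):
--     names = {1: "A", 11: "J", 12: "Q", 13: "K"}
--     base = sum(min(c, 10) for c in cartas if c >= 2)
--     n = sum(1 for c in cartas if c == 1)
--     pontos = base + n + (10 if n >= 1 and base + 11 <= 21 else 0)
--     return "[ " + "".join(names.get(c, str(c)) + " " for c in cartas) + "] = " + str(pontos)
-- ===== Notes on version B (the rewrite author's own statement) =====
-- stated objective: simpler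
-- what changed: Points are computed in one filtered-sum pass plus a closed-form soft-ace adjustment (base + n_aces + 10 iff an ace exists and base+11 <= 21) instead of A's two sequential loops with an iterative running-total ace test, and the card string is built by joining a name-table lookup instead of an accumulating if-chain.
import Mathlib
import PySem

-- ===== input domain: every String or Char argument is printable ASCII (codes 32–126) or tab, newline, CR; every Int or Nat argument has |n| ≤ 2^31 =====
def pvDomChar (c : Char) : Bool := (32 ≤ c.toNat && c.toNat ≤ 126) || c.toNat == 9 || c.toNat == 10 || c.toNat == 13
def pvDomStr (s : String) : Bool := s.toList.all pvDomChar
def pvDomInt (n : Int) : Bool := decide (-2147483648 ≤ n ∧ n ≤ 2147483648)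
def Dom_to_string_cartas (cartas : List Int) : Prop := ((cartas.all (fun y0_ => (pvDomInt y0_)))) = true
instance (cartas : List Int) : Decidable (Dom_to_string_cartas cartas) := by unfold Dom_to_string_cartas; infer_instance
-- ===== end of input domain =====

-- B replaces A's two sequential point-counting loops and running-total ace test by a single
-- filtered sum plus a closed-form soft-ace adjustment, and builds the card string by join over
-- a name table instead of an accumulating if-chain (objective: simpler).

-- ===== PORT A =====
def conta_pontos (cartas : List Int) : Int :=
  let total : Int := 0
  let total := cartas.foldl (fun total carta =>
    if carta ≥ 2 ∧ carta ≤ 10 then total + carta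
    else if carta > 10 then total + 10
    else total) total
  let total := cartas.foldl (fun total carta =>
    if carta = 1 then
      if total + 11 > 21 then total + 1 else total + 11
    else total) total
  total

def to_string_cartas (cartas : List Int) : String :=
  let s := "[ "
  let s := cartas.foldl (fun s carta =>
    if carta = 1 then s ++ "A "
    else if carta = 11 then s ++ "J "
    else if carta = 12 then s ++ "Q "
    else if carta = 13 then s ++ "K "
    else s ++ PySem.Int.toStr carta ++ " ") s
  s ++ "] = " ++ PySem.Int.toStr (conta_pontos cartas)

-- ===== PORT B =====
def pvNames : PySem.Dict Int String := PySem.Dict.ofList [(1, "A"), (11, "J"), (12, "Q"), (13, "K")]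

def to_string_cartas_alt (cartas : List Int) : String :=
  let base : Int := ((cartas.filter (fun c => c ≥ 2)).map (fun c => min c 10)).sum
  let n : Int := ((cartas.filter (fun c => c = 1)).length : Int)
  let pontos : Int := base + n + (if 1 ≤ n ∧ base + 11 ≤ 21 then 10 else 0)
  "[ " ++ PySem.Str.join "" (cartas.map (fun c => pvNames.getD c (PySem.Int.toStr c) ++ " "))
    ++ "] = " ++ PySem.Int.toStr pontos

-- ===== PRECONDITION & SPEC =====
def Spec_to_string_cartas (cartas : List Int) (out : String) : Prop := out = to_string_cartas_alt cartas
instance (cartas : List Int) (out : String) : Decidable (Spec_to_string_cartas cartas out) := by unfold Spec_to_string_cartas; infer_instance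

-- ===== CLAIM (what is proved, stated in full; the proofs are below) =====
def Claim_equal_to_string_cartas : Prop := ∀ (cartas : List Int), Dom_to_string_cartas cartas → Spec_to_string_cartas cartas (to_string_cartas cartas)

-- ===== LEMMAS AND PROOFS =====

-- B's per-card display piece
def pvPiece (c : Int) : String := pvNames.getD c (PySem.Int.toStr c) ++ " "

theorem pvJoin0_cons (p : String) (rest : List String) :
    PySem.Str.join "" (p :: rest) = p ++ PySem.Str.join "" rest := by
  apply String.toList_inj.mp
  cases rest with
  | nil =>
      simp [PySem.Str.toList_join, PySem.Chars.join_singleton, PySem.Chars.join_nil]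
  | cons q rs =>
      simp [PySem.Str.toList_join, PySem.Chars.join_cons_cons]

theorem pvNames_mk : pvNames = PySem.Dict.mk [(1, "A"), (11, "J"), (12, "Q"), (13, "K")] := by
  decide

theorem pvStepA_eq (s : String) (c : Int) :
    (if c = 1 then s ++ "A "
     else if c = 11 then s ++ "J "
     else if c = 12 then s ++ "Q "
     else if c = 13 then s ++ "K "
     else s ++ PySem.Int.toStr c ++ " ") = s ++ pvPiece c := by
  unfold pvPiece
  rw [pvNames_mk]
  have ha : ("A" : String) ++ " " = "A " := by decide
  have hj : ("J" : String) ++ " " = "J " := by decide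
  have hq : ("Q" : String) ++ " " = "Q " := by decide
  have hk : ("K" : String) ++ " " = "K " := by decide
  split_ifs with h1 h2 h3 h4
  · subst h1; simp [PySem.Dict.getD, PySem.Dict.get?_mk_cons, ha]
  · subst h2; simp [PySem.Dict.getD, PySem.Dict.get?_mk_cons, hj]
  · subst h3; simp [PySem.Dict.getD, PySem.Dict.get?_mk_cons, hq]
  · subst h4; simp [PySem.Dict.getD, PySem.Dict.get?_mk_cons, hk]
  · simp [PySem.Dict.getD, PySem.Dict.get?,
      Ne.symm h1, Ne.symm h2, Ne.symm h3, Ne.symm h4, String.append_assoc]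

theorem pvFoldStr (l : List Int) (s : String) :
    l.foldl (fun s carta =>
      if carta = 1 then s ++ "A "
      else if carta = 11 then s ++ "J "
      else if carta = 12 then s ++ "Q "
      else if carta = 13 then s ++ "K "
      else s ++ PySem.Int.toStr carta ++ " ") s
    = s ++ PySem.Str.join "" (l.map pvPiece) := by
  induction l generalizing s with
  | nil => simp [show PySem.Str.join "" ([] : List String) = "" from by decide]
  | cons c rest ih =>
      simp only [List.foldl_cons, List.map_cons, pvJoin0_cons]
      rw [pvStepA_eq, ih, String.append_assoc]

theorem pvFold1 (l : List Int) (t : Int) :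
    l.foldl (fun total carta =>
      if carta ≥ 2 ∧ carta ≤ 10 then total + carta
      else if carta > 10 then total + 10
      else total) t
    = t + ((l.filter (fun c => c ≥ 2)).map (fun c => min c 10)).sum := by
  induction l generalizing t with
  | nil => simp
  | cons c rest ih =>
      simp only [List.foldl_cons, List.filter_cons]
      split_ifs with h1 h2 h3 <;> simp_all [ih] <;> omega

theorem pvBaseNonneg (l : List Int) :
    0 ≤ ((l.filter (fun c => c ≥ 2)).map (fun c => min c 10)).sum := by
  induction l with
  | nil => simp
  | cons c rest ih =>
      simp only [List.filter_cons]
      split_ifs with h <;> simp_all <;> omega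

theorem pvFold2 (l : List Int) (t : Int) (ht : 0 ≤ t) :
    l.foldl (fun total carta =>
      if carta = 1 then
        if total + 11 > 21 then total + 1 else total + 11
      else total) t
    = t + ((l.filter (fun c => c = 1)).length : Int)
        + (if 1 ≤ ((l.filter (fun c => c = 1)).length : Int) ∧ t + 11 ≤ 21 then 10 else 0) := by
  induction l generalizing t with
  | nil => simp
  | cons c rest ih =>
      by_cases hc : c = 1
      · subst hc
        simp only [List.foldl_cons, List.filter_cons, decide_true, if_true,
          List.length_cons]
        by_cases hbig : t + 11 > 21
        · rw [if_pos hbig, ih (t + 1) (by omega)]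
          push_cast; split_ifs <;> omega
        · rw [if_neg hbig, ih (t + 11) (by omega)]
          push_cast; split_ifs <;> omega
      · simp [hc, ih t ht]

theorem pvPontos (cartas : List Int) :
    conta_pontos cartas =
      ((cartas.filter (fun c => c ≥ 2)).map (fun c => min c 10)).sum
      + ((cartas.filter (fun c => c = 1)).length : Int)
      + (if 1 ≤ ((cartas.filter (fun c => c = 1)).length : Int) ∧
            ((cartas.filter (fun c => c ≥ 2)).map (fun c => min c 10)).sum + 11 ≤ 21
         then 10 else 0) := by
  simp only [conta_pontos]
  rw [pvFold1, pvFold2 _ _ (by simpa using pvBaseNonneg cartas)]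
  simp

-- ===== VERDICT (by name: the statement is the Claim_ definition above) =====
theorem to_string_cartas_spec : Claim_equal_to_string_cartas := by
  intro cartas _
  unfold Spec_to_string_cartas
  simp only [to_string_cartas, to_string_cartas_alt]
  rw [pvFoldStr, pvPontos,
    show pvPiece = (fun c => pvNames.getD c (PySem.Int.toStr c) ++ " ") from rfl]
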